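-- pv_equiv track=rewrite | github.com/XuXinyuan2019/ML-Algo | Decision Tree I/decisionStump.py | modeling
-- ===== SOURCE A (Python) =====
-- def modeling(input_data, n):
--     #the number of that feature
--     dict_n = {}
--     for line in input_data[1:]:
--         key = line[n]
--         dict_n[key] = dict_n.get(key, 0) + 1
--     #define a dict of that node: dict_n
--
--     dict_n_sorted = sorted(dict_n.items(), key = lambda item:item[1], reverse=True) #dict sorted by value
--     left = dict_n_sorted[0][0]
--     right = dict_n_sorted[1][0]
--     #define left and right
--
--     dict_n_left = {}
--     dict_n_right = {}
--     for line in input_data[1:]: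
--         key = line[-1]
--         if line[n]==left: dict_n_left[key] = dict_n_left.get(key, 0) + 1
--         if line[n]==right: dict_n_right[key] = dict_n_right.get(key, 0) + 1
--
--     left_value = max(dict_n_left, key=dict_n_left.get) #get the key to the max value
--     right_value = max(dict_n_right, key=dict_n_right.get) #get the key to the max value
--
--     tree_n = {left:left_value, right:right_value}
--
--     return tree_n
-- ===== SOURCE B (Python) =====
-- def modeling(input_data, n):
--     # single pass: group rows by feature value into nested label counters
--     nested = {}
--     for line in input_data[1:]:
--         inner = nested.get(line[n], {})
--         inner[line[-1]] = inner.get(line[-1], 0) + 1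
--         nested[line[n]] = inner
--     top = sorted(nested.items(), key=lambda kv: sum(kv[1].values()), reverse=True)
--     left, right = top[0], top[1]
--     return {left[0]: max(left[1], key=left[1].get),
--             right[0]: max(right[1], key=right[1].get)}
-- ===== Notes on version B (the rewrite author's own statement) =====
-- stated objective: alternative
-- what changed: B makes one pass building a nested dict (feature value -> label counter), so the totals for the top-two split and both label argmaxes are all read off that single grouping structure instead of A's three separate counting passes over the data.
import Mathlib
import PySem

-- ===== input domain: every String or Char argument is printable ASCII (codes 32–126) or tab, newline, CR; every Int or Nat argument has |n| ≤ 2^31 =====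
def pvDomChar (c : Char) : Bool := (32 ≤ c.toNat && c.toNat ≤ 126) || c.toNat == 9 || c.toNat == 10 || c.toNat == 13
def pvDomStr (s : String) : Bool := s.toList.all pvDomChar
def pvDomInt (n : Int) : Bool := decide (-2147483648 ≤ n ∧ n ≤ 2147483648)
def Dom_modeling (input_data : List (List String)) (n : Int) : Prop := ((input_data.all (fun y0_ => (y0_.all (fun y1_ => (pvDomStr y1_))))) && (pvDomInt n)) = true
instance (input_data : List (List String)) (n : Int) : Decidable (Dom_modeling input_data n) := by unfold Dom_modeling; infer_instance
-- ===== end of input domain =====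

-- B replaces A's three counting passes over the rows by ONE pass that groups rows into a nested
-- dict (feature value -> label counter); split totals and label argmaxes are read off that structure.

-- ===== PORT A =====
-- Python raise sites (dict_n_sorted[0]/[1] IndexError, line[n]/line[-1] IndexError, max() on empty)
-- are `none` of pyGet?/max? here; the default branches returning [] / "" are reached only outside Pre_modeling.
def modeling (input_data : List (List String)) (n : Int) : List (String × String) :=
  let rows := PySem.List.slice input_data (some 1) none
  let dict_n := rows.foldl (fun d line =>
      d.insert (PySem.List.pyGetD line n "") (d.getD (PySem.List.pyGetD line n "") 0 + 1))
      (PySem.Dict.empty : PySem.Dict String Int)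
  let dict_n_sorted := PySem.List.sorted dict_n.items (fun item => item.2) true
  match PySem.List.pyGet? dict_n_sorted 0, PySem.List.pyGet? dict_n_sorted 1 with
  | some l0, some r0 =>
    let left := l0.1
    let right := r0.1
    let pair := rows.foldl (fun (dl : PySem.Dict String Int × PySem.Dict String Int) line =>
        let key := PySem.List.pyGetD line (-1) ""
        (if PySem.List.pyGetD line n "" == left then dl.1.insert key (dl.1.getD key 0 + 1) else dl.1,
         if PySem.List.pyGetD line n "" == right then dl.2.insert key (dl.2.getD key 0 + 1) else dl.2))
      (PySem.Dict.empty, PySem.Dict.empty)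
    -- max(d, key=d.get): every iterated key is in d, so d.get k = d.getD k 0 there
    match PySem.List.max? pair.1.keys (fun k => pair.1.getD k 0),
          PySem.List.max? pair.2.keys (fun k => pair.2.getD k 0) with
    | some left_value, some right_value =>
        (((PySem.Dict.empty : PySem.Dict String String).insert left left_value).insert right right_value).items
    | _, _ => []
  | _, _ => []

-- ===== PORT B =====
-- one grouping pass: nested[line[n]] = inner counter updated at line[-1] (Dict.modify is exactly
-- inner = nested.get(k, {}); inner[lab] = inner.get(lab, 0) + 1; nested[k] = inner)
def modeling_alt (input_data : List (List String)) (n : Int) : List (String × String) :=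
  let rows := PySem.List.slice input_data (some 1) none
  let nested := rows.foldl (fun d line =>
      d.modify (PySem.List.pyGetD line n "") PySem.Dict.empty
        (fun inner => inner.insert (PySem.List.pyGetD line (-1) "")
          (inner.getD (PySem.List.pyGetD line (-1) "") 0 + 1)))
    (PySem.Dict.empty : PySem.Dict String (PySem.Dict String Int))
  let top := PySem.List.sorted nested.items (fun kv => kv.2.values.sum) true
  -- max(inner, key=inner.get): every iterated key is in inner, so inner.get k = inner.getD k 0
  (((PySem.List.pyGet? top 0).bind (fun l0 =>
    (PySem.List.pyGet? top 1).bind (fun r0 =>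
      (PySem.List.max? l0.2.keys (fun k => l0.2.getD k 0)).bind (fun lv =>
        (PySem.List.max? r0.2.keys (fun k => r0.2.getD k 0)).map (fun rv =>
          (((PySem.Dict.empty : PySem.Dict String String).insert l0.1 lv).insert r0.1 rv).items)))))).getD []

-- ===== PRECONDITION & SPEC =====
-- Pre_ is exactly where the Python A returns: every data row admits index n (hence is nonempty, so
-- line[-1] is defined) and the feature column has at least two distinct values (else dict_n_sorted[1]
-- raises IndexError).
def Pre_modeling (input_data : List (List String)) (n : Int) : Prop :=
  (∀ line ∈ input_data.tail, PySem.Raise.InRange line.length n) ∧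
  2 ≤ (PySem.Set.ofList (input_data.tail.map (fun line => PySem.List.pyGetD line n ""))).length
instance (input_data : List (List String)) (n : Int) : Decidable (Pre_modeling input_data n) := by
  unfold Pre_modeling; infer_instance
def pvWitness_modeling : List (List String) × Int :=
  ([["h", "lab"], ["a", "x"], ["a", "x"], ["b", "y"]], 0)
def Spec_modeling (input_data : List (List String)) (n : Int) (out : List (String × String)) : Prop := out = modeling_alt input_data n
instance (input_data : List (List String)) (n : Int) (out : List (String × String)) : Decidable (Spec_modeling input_data n out) := by unfold Spec_modeling; infer_instance

-- ===== CLAIM (what is proved, stated in full; the proofs are below) =====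
def Claim_equal_modeling : Prop := ∀ (input_data : List (List String)) (n : Int), Dom_modeling input_data n → Pre_modeling input_data n → Spec_modeling input_data n (modeling input_data n)

-- ===== LEMMAS AND PROOFS =====

theorem pv_fold_counter {α κ : Type} [BEq κ] (l : List α) (g : α → κ) :
    l.foldl (fun d x => d.insert (g x) (d.getD (g x) 0 + 1)) PySem.Dict.empty
      = PySem.Dict.counter (l.map g) := by
  rw [← PySem.Dict.foldl_insert_getD_add_one_eq_counter, List.foldl_map]

theorem pv_fold_counter_if {α κ : Type} [BEq κ] (l : List α) (p : α → Bool) (lab : α → κ) :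
    l.foldl (fun d x => if p x then d.insert (lab x) (d.getD (lab x) 0 + 1) else d) PySem.Dict.empty
      = PySem.Dict.counter ((l.filter p).map lab) := by
  rw [PySem.List.foldl_if_eq_foldl_filter, pv_fold_counter]

theorem pv_insertBy_map {α β : Type} (b : α → α → Bool) (b' : β → β → Bool) (f : α → β)
    (hf : ∀ a c, b' (f a) (f c) = b a c) (x : α) (ys : List α) :
    PySem.List.insertBy b' (f x) (ys.map f) = (PySem.List.insertBy b x ys).map f := by
  induction ys with
  | nil => rfl
  | cons y ys ih =>
      simp only [List.map_cons, PySem.List.insertBy, hf]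
      by_cases h : b x y
      · simp [h]
      · simp [h, ih]

theorem pv_sorted_rev_map {α β κ : Type} [LinearOrder κ] (l : List α) (f : α → β) (key : β → κ) :
    PySem.List.sorted (l.map f) key true = (PySem.List.sorted l (fun x => key (f x)) true).map f := by
  rw [PySem.List.sorted_rev_eq_foldl_insertBy, PySem.List.sorted_rev_eq_foldl_insertBy]
  suffices h : ∀ acc : List α, (l.map f).foldl
      (fun acc x => PySem.List.insertBy (fun a c => decide (key c < key a)) x acc) (acc.map f)
      = (l.foldl (fun acc x => PySem.List.insertBy (fun a c => decide (key (f c) < key (f a))) x acc) acc).map f by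
    simpa using h []
  induction l with
  | nil => intro acc; simp
  | cons x xs ih =>
      intro acc
      simp only [List.map_cons, List.foldl_cons]
      rw [pv_insertBy_map (fun a c => decide (key (f c) < key (f a))) _ f (fun a c => rfl)]
      exact ih _

theorem pv_pyGet?_nil {α : Type} (i : Int) : PySem.List.pyGet? ([] : List α) i = none := by
  simp [pysem, PySem.Raise.InRange]

theorem pv_pyGet?_singleton_one {α : Type} (x : α) : PySem.List.pyGet? [x] 1 = none := by
  simp [pysem]

theorem pv_pyGet?_singleton_zero {α : Type} (x : α) : PySem.List.pyGet? [x] 0 = some x := by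
  simp [pysem]

theorem pv_sum_counter_values (ls : List String) :
    ((PySem.Dict.counter ls).values).sum = (ls.length : Int) := by
  have hv : (PySem.Dict.counter ls).values
      = (PySem.Set.ofList ls).map (fun k => ((ls.count k : Nat) : Int)) := by
    show ((PySem.Dict.counter ls).items).map (·.2) = _
    rw [PySem.Dict.items_counter, List.map_map]; rfl
  have hperm : (PySem.Set.ofList ls).Perm ls.dedup :=
    List.perm_of_nodup_nodup_toFinset_eq (PySem.Set.nodup_ofList ls) ls.nodup_dedup
      (by ext a; simp [PySem.Set.mem_ofList])
  have hmm : (List.map (fun k => ((ls.count k : Nat) : Int)) ls.dedup)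
      = List.map (fun m : Nat => (m : Int)) (List.map (fun k => ls.count k) ls.dedup) := by
    rw [List.map_map]; rfl
  rw [hv, (hperm.map _).sum_eq, hmm, ← Nat.cast_list_sum, List.sum_map_count_dedup_eq_length]

theorem pv_getD_group (l : List (List String)) (n : Int)
    (d : PySem.Dict String (PySem.Dict String Int)) (k : String) :
    (l.foldl (fun d line => d.modify (PySem.List.pyGetD line n "") PySem.Dict.empty
        (fun inner => inner.insert (PySem.List.pyGetD line (-1) "")
          (inner.getD (PySem.List.pyGetD line (-1) "") 0 + 1))) d).getD k PySem.Dict.empty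
    = ((l.filter (fun line => PySem.List.pyGetD line n "" == k)).map
        (fun line => PySem.List.pyGetD line (-1) "")).foldl
        (fun c y => c.insert y (c.getD y 0 + 1)) (d.getD k PySem.Dict.empty) := by
  induction l generalizing d with
  | nil => rfl
  | cons x xs ih =>
    simp only [List.foldl_cons, List.filter_cons]
    by_cases h : PySem.List.pyGetD x n "" = k
    · simp only [h, beq_self_eq_true, if_true, List.map_cons, List.foldl_cons, ih,
        PySem.Dict.getD_modify]
    · simp only [ih, PySem.Dict.getD_modify, if_neg (Ne.symm h), h, beq_iff_eq, if_false]

theorem pv_group_items (rows : List (List String)) (n : Int) :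
    (rows.foldl (fun d line => d.modify (PySem.List.pyGetD line n "") PySem.Dict.empty
        (fun inner => inner.insert (PySem.List.pyGetD line (-1) "")
          (inner.getD (PySem.List.pyGetD line (-1) "") 0 + 1)))
      (PySem.Dict.empty : PySem.Dict String (PySem.Dict String Int))).items
    = (PySem.Set.ofList (rows.map (fun line => PySem.List.pyGetD line n ""))).map
        (fun k => (k, PySem.Dict.counter
          ((rows.filter (fun line => PySem.List.pyGetD line n "" == k)).map
            (fun line => PySem.List.pyGetD line (-1) "")))) := by
  have hnd : (rows.foldl (fun d line => d.modify (PySem.List.pyGetD line n "") PySem.Dict.empty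
        (fun inner => inner.insert (PySem.List.pyGetD line (-1) "")
          (inner.getD (PySem.List.pyGetD line (-1) "") 0 + 1)))
      (PySem.Dict.empty : PySem.Dict String (PySem.Dict String Int))).keys.Nodup := by
    simpa using PySem.Dict.nodup_keys_foldl_modify_key rows
      (fun line => PySem.List.pyGetD line n "") PySem.Dict.empty
      (fun _ line => fun inner => inner.insert (PySem.List.pyGetD line (-1) "")
        (inner.getD (PySem.List.pyGetD line (-1) "") 0 + 1))
      PySem.Dict.empty (by simp)
  have hk : (rows.foldl (fun d line => d.modify (PySem.List.pyGetD line n "") PySem.Dict.empty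
        (fun inner => inner.insert (PySem.List.pyGetD line (-1) "")
          (inner.getD (PySem.List.pyGetD line (-1) "") 0 + 1)))
      (PySem.Dict.empty : PySem.Dict String (PySem.Dict String Int))).keys
      = PySem.Set.ofList (rows.map (fun line => PySem.List.pyGetD line n "")) := by
    simpa [PySem.Set.update, PySem.Set.ofList_eq_foldl, PySem.Dict.keys_empty]
      using PySem.Dict.keys_foldl_modify_key rows
      (fun line => PySem.List.pyGetD line n "") PySem.Dict.empty
      (fun _ line => fun inner => inner.insert (PySem.List.pyGetD line (-1) "")
        (inner.getD (PySem.List.pyGetD line (-1) "") 0 + 1))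
      PySem.Dict.empty
  rw [PySem.Dict.items_eq_map_keys _ hnd PySem.Dict.empty, hk]
  apply List.map_congr_left
  intro k _
  rw [pv_getD_group, PySem.Dict.getD_empty, PySem.Dict.foldl_insert_getD_add_one_eq_counter]

theorem pv_labels_length (rows : List (List String)) (n : Int) (k : String) :
    (((rows.filter (fun line => PySem.List.pyGetD line n "" == k)).map
        (fun line => PySem.List.pyGetD line (-1) "")).length : Int)
    = (((rows.map (fun line => PySem.List.pyGetD line n "")).count k : Nat) : Int) := by
  have : (rows.map (fun line => PySem.List.pyGetD line n "")).count k
      = rows.countP (fun line => PySem.List.pyGetD line n "" == k) := by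
    simp [List.count, List.countP_map]; rfl
  rw [this]
  simp [List.countP_eq_length_filter]

theorem pv_core (rows : List (List String)) (n : Int) :
    (let dict_n := rows.foldl (fun d line =>
        d.insert (PySem.List.pyGetD line n "") (d.getD (PySem.List.pyGetD line n "") 0 + 1))
        (PySem.Dict.empty : PySem.Dict String Int)
     let dict_n_sorted := PySem.List.sorted dict_n.items (fun item => item.2) true
     match PySem.List.pyGet? dict_n_sorted 0, PySem.List.pyGet? dict_n_sorted 1 with
     | some l0, some r0 =>
       let left := l0.1
       let right := r0.1
       let pair := rows.foldl (fun (dl : PySem.Dict String Int × PySem.Dict String Int) line =>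
           let key := PySem.List.pyGetD line (-1) ""
           (if PySem.List.pyGetD line n "" == left then dl.1.insert key (dl.1.getD key 0 + 1) else dl.1,
            if PySem.List.pyGetD line n "" == right then dl.2.insert key (dl.2.getD key 0 + 1) else dl.2))
         (PySem.Dict.empty, PySem.Dict.empty)
       match PySem.List.max? pair.1.keys (fun k => pair.1.getD k 0),
             PySem.List.max? pair.2.keys (fun k => pair.2.getD k 0) with
       | some left_value, some right_value =>
           (((PySem.Dict.empty : PySem.Dict String String).insert left left_value).insert right right_value).items
       | _, _ => []
     | _, _ => [])
    =
    (let nested := rows.foldl (fun d line =>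
        d.modify (PySem.List.pyGetD line n "") PySem.Dict.empty
          (fun inner => inner.insert (PySem.List.pyGetD line (-1) "")
            (inner.getD (PySem.List.pyGetD line (-1) "") 0 + 1)))
      (PySem.Dict.empty : PySem.Dict String (PySem.Dict String Int))
     let top := PySem.List.sorted nested.items (fun kv => kv.2.values.sum) true
     (((PySem.List.pyGet? top 0).bind (fun l0 =>
       (PySem.List.pyGet? top 1).bind (fun r0 =>
         (PySem.List.max? l0.2.keys (fun k => l0.2.getD k 0)).bind (fun lv =>
           (PySem.List.max? r0.2.keys (fun k => r0.2.getD k 0)).map (fun rv =>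
             (((PySem.Dict.empty : PySem.Dict String String).insert l0.1 lv).insert r0.1 rv).items)))))).getD []) := by
  simp only []
  rw [pv_fold_counter rows (fun line => PySem.List.pyGetD line n ""), PySem.Dict.items_counter,
    pv_group_items rows n]
  rw [pv_sorted_rev_map (PySem.Set.ofList (rows.map (fun line => PySem.List.pyGetD line n "")))
      (fun k => (k, ((rows.map (fun line => PySem.List.pyGetD line n "")).count k : Int)))
      (fun item => item.2),
    pv_sorted_rev_map (PySem.Set.ofList (rows.map (fun line => PySem.List.pyGetD line n "")))
      (fun k => (k, PySem.Dict.counter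
        ((rows.filter (fun line => PySem.List.pyGetD line n "" == k)).map
          (fun line => PySem.List.pyGetD line (-1) ""))))
      (fun kv => kv.2.values.sum)]
  have hkey : (fun k => (PySem.Dict.counter
        ((rows.filter (fun line => PySem.List.pyGetD line n "" == k)).map
          (fun line => PySem.List.pyGetD line (-1) ""))).values.sum)
      = (fun k => ((rows.map (fun line => PySem.List.pyGetD line n "")).count k : Int)) := by
    funext k
    rw [pv_sum_counter_values, pv_labels_length]
  rw [hkey]
  generalize PySem.List.sorted (PySem.Set.ofList (rows.map (fun line => PySem.List.pyGetD line n "")))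
      (fun k => ((rows.map (fun line => PySem.List.pyGetD line n "")).count k : Int)) true = S
  match S with
  | [] => simp only [List.map_nil, pv_pyGet?_nil]; rfl
  | [a] => simp only [List.map_cons, List.map_nil, pv_pyGet?_singleton_one,
      pv_pyGet?_singleton_zero, Option.bind_some, Option.bind_none, Option.getD_none]
  | a :: b :: t =>
    have h0 : ∀ {β : Type} (f : String → β),
        PySem.List.pyGet? ((a :: b :: t).map f) 0 = some (f a) := by
      intro β f; simp [pysem]
    have h1 : ∀ {β : Type} (f : String → β),
        PySem.List.pyGet? ((a :: b :: t).map f) 1 = some (f b) := by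
      intro β f; simp [pysem]
    rw [h0, h1, h0, h1]
    simp only [Option.bind_some]
    rw [PySem.List.foldl_prod_mk
      (f := fun (d : PySem.Dict String Int) line =>
        if PySem.List.pyGetD line n "" == a then
          d.insert (PySem.List.pyGetD line (-1) "") (d.getD (PySem.List.pyGetD line (-1) "") 0 + 1)
        else d)
      (g := fun (d : PySem.Dict String Int) line =>
        if PySem.List.pyGetD line n "" == b then
          d.insert (PySem.List.pyGetD line (-1) "") (d.getD (PySem.List.pyGetD line (-1) "") 0 + 1)
        else d)]
    rw [pv_fold_counter_if rows (fun line => PySem.List.pyGetD line n "" == a),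
      pv_fold_counter_if rows (fun line => PySem.List.pyGetD line n "" == b)]
    generalize PySem.List.max? (PySem.Dict.counter
        ((rows.filter (fun line => PySem.List.pyGetD line n "" == a)).map
          (fun line => PySem.List.pyGetD line (-1) ""))).keys
        (fun k => (PySem.Dict.counter
          ((rows.filter (fun line => PySem.List.pyGetD line n "" == a)).map
            (fun line => PySem.List.pyGetD line (-1) ""))).getD k 0) = m1
    generalize PySem.List.max? (PySem.Dict.counter
        ((rows.filter (fun line => PySem.List.pyGetD line n "" == b)).map
          (fun line => PySem.List.pyGetD line (-1) ""))).keys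
        (fun k => (PySem.Dict.counter
          ((rows.filter (fun line => PySem.List.pyGetD line n "" == b)).map
            (fun line => PySem.List.pyGetD line (-1) ""))).getD k 0) = m2
    cases m1 <;> cases m2 <;> rfl

-- ===== VERDICT (by name: the statement is the Claim_ definition above) =====
theorem modeling_spec : Claim_equal_modeling := by
  intro input_data n _hdom _hpre
  exact pv_core (PySem.List.slice input_data (some 1) none) n
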